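-- pv_equiv track=rewrite | github.com/shaeka/Minimal_News_Digest | main.py | tool_format_digest
-- ===== SOURCE A (Python) =====
-- from typing import Any, Dict, List, Optional, TypedDict, Literal
--
-- class Summary(TypedDict):
--     article_id: str
--     title: str
--     key_points: List[str]
--     bias_note: str
--     summary_text: str
--
-- def tool_format_digest(
--     summaries: List[Summary],
--     highlights: List[str],
--     clusters: Dict[str, List[int]],
--     prefs: Dict[str, Any] | None = None,
--     style: str = "markdown",
--     tone: str = "concise",
-- ) -> str:
--     prefs = prefs or {}
--     title = prefs.get("title", "Daily Digest")
--     intro = "Here’s your curated digest." if tone != "formal" else "Below is the curated digest."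
--
--     # Helper to lookup article titles by ID
--     id_to_title = {s["article_id"]: s["title"] for s in summaries}
--
--     if style == "html":
--         parts = [f"<h1>{title}</h1><p>{intro}</p>"]
--         if clusters:
--             parts.append("<h2>Trends</h2><ul>")
--             for label, ids in clusters.items():
--                 titles = [id_to_title.get(i, str(i)) for i in ids]
--                 parts.append(f"<li><b>{label.title()}</b>: {', '.join(titles)}</li>")
--             parts.append("</ul>")
--         if highlights:
--             parts.append("<h2>Highlights</h2><ul>")
--             for h in highlights:
--                 parts.append(f"<li>{h}</li>")
--             parts.append("</ul>")
--         parts.append("<h2>Articles</h2>")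
--         for s in summaries:
--             parts.append(f"<h3>{s['title']}</h3><p>{s['summary_text']}</p><p><i>{s['bias_note']}</i></p>")
--         return "\n".join(parts)
--
--     elif style == "text":
--         parts = [f"{title}\n{'='*len(title)}\n{intro}\n"]
--         if clusters:
--             parts.append("Trends:")
--             for label, ids in clusters.items():
--                 titles = [id_to_title.get(i, str(i)) for i in ids]
--                 parts.append(f"- {label.title()}: {', '.join(titles)}")
--             parts.append("")
--         if highlights:
--             parts.append("Highlights:")
--             for h in highlights:
--                 parts.append(f"- {h}")
--             parts.append("")
--         parts.append("Articles:")
--         for s in summaries: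
--             parts.append(f"- {s['title']}\n  {s['summary_text']}\n  ({s['bias_note']})")
--         return "\n".join(parts)
--
--     else:  # markdown (default)
--         parts = [f"# {title}\n\n{intro}\n"]
--         if clusters:
--             parts.append("## Trends\n")
--             for label, ids in clusters.items():
--                 titles = [id_to_title.get(i, str(i)) for i in ids]
--                 parts.append(f"- **{label.title()}**: {', '.join(titles)}")
--             parts.append("")
--         if highlights:
--             parts.append("## Highlights\n")
--             for h in highlights:
--                 parts.append(f"- {h}")
--             parts.append("")
--         parts.append("## Articles\n")
--         for s in summaries:
--             parts.append(f"### {s['title']}\n{s['summary_text']}\n\n*{s['bias_note']}*\n")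
--         return "\n".join(parts)
-- ===== SOURCE B (Python) =====
-- def tool_format_digest(summaries, highlights, clusters, prefs=None, style="markdown", tone="concise"):
--     p = prefs or {}
--     title = p.get("title", "Daily Digest")
--     intro = "Below is the curated digest." if tone == "formal" else "Here’s your curated digest."
--     key = style if style in ("html", "text") else "markdown"
--     und = "=" * len(title)
--     CFG = {
--         "html": (f"<h1>{title}</h1><p>{intro}</p>",
--                  ["<h2>Trends</h2><ul>"], ["</ul>"], "<li><b>{0}</b>: {1}</li>",
--                  ["<h2>Highlights</h2><ul>"], ["</ul>"], "<li>{0}</li>",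
--                  "<h2>Articles</h2>", "<h3>{0}</h3><p>{1}</p><p><i>{2}</i></p>"),
--         "text": (f"{title}\n{und}\n{intro}\n",
--                  ["Trends:"], [""], "- {0}: {1}",
--                  ["Highlights:"], [""], "- {0}",
--                  "Articles:", "- {0}\n  {1}\n  ({2})"),
--         "markdown": (f"# {title}\n\n{intro}\n",
--                  ["## Trends\n"], [""], "- **{0}**: {1}",
--                  ["## Highlights\n"], [""], "- {0}",
--                  "## Articles\n", "### {0}\n{1}\n\n*{2}*\n"),
--     }
--     header, t_open, t_close, t_fmt, h_open, h_close, h_fmt, a_head, a_fmt = CFG[key]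
--     # cluster ids are ints while article ids are strings, so A's id_to_title.get(i, str(i))
--     # never finds a match and always yields str(i)
--     parts = [header]
--     if clusters:
--         parts += t_open
--         parts += [t_fmt.format(label.title(), ", ".join(str(i) for i in ids))
--                   for label, ids in clusters.items()]
--         parts += t_close
--     if highlights:
--         parts += h_open + [h_fmt.format(h) for h in highlights] + h_close
--     parts.append(a_head)
--     parts += [a_fmt.format(s["title"], s["summary_text"], s["bias_note"]) for s in summaries]
--     return "\n".join(parts)
-- ===== Notes on version B (the rewrite author's own statement) =====
-- stated objective: simpler
-- what changed: Replaces A's three duplicated per-style branches by a single per-style markup table (header, section openers/closers, item format strings) plus one generic assembly pass over clusters/highlights/summaries, and drops the id_to_title dict since its int-keyed lookup can never match a str key and always yields str(i).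
import Mathlib
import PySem

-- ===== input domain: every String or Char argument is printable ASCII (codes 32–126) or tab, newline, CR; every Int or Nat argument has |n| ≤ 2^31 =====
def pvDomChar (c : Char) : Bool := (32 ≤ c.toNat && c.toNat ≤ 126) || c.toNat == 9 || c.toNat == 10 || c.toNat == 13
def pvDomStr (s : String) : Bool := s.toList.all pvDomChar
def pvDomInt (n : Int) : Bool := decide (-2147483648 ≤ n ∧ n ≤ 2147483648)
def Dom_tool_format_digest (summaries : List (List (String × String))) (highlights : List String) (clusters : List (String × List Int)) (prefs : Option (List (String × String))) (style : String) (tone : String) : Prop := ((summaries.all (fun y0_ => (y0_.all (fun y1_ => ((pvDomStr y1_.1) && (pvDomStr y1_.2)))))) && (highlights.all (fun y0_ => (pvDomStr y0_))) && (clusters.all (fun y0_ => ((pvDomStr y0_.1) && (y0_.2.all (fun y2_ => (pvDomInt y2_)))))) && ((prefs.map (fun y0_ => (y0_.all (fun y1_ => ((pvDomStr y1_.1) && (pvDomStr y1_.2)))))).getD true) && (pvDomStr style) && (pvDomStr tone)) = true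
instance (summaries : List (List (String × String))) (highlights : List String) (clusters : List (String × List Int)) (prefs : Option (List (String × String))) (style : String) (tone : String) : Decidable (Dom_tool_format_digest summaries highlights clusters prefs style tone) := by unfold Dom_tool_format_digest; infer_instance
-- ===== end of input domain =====

-- B replaces A's three duplicated style branches by one per-style markup table and a single
-- table-driven assembly pass (objective: simpler decomposition; same output byte for byte).

-- shared ports of Python built-ins used by both versions
-- dict.get k dflt / d[k] on a dict passed in as an association list (lookup = first match)
def getS (d : List (String × String)) (k dflt : String) : String :=
  match d with
  | [] => dflt
  | (k', v) :: t => if k' == k then v else getS t k dflt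

-- str.title() — exact for the ASCII domain: a letter is upper-cased after a non-letter,
-- lower-cased after a letter; non-letters are kept and reset the word
def titleChars (cs : List Char) (prevAlpha : Bool) : List Char :=
  match cs with
  | [] => []
  | c :: t =>
    (if PySem.Chars.isalpha c then
        (if prevAlpha then PySem.Chars.lowerChar c else PySem.Chars.upperChar c)
      else c) :: titleChars t (PySem.Chars.isalpha c)

def pyTitle (s : String) : String := String.ofList (titleChars s.toList false)

-- '=' * len(title)
def underline (title : String) : String := String.ofList (List.replicate (PySem.Str.len title).toNat '=')

-- ===== PORT A =====
def tool_format_digest (summaries : List (List (String × String))) (highlights : List String) (clusters : List (String × List Int)) (prefs : Option (List (String × String))) (style : String) (tone : String) : String :=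
  let p := prefs.getD []                                    -- prefs = prefs or {}
  let title := getS p "title" "Daily Digest"
  let intro := if !(tone == "formal") then "Here’s your curated digest." else "Below is the curated digest."
  -- id_to_title = {s["article_id"]: s["title"] for s in summaries}  (KeyError excluded by Pre_)
  let _id_to_title := summaries.foldl
    (fun d s => d.insert (getS s "article_id" "") (getS s "title" "")) (PySem.Dict.empty)
  -- id_to_title.get(i, str(i)): i is an int while every key is a str, so the Python lookup
  -- can never match and always returns the default str(i); ported as PySem.Int.toStr i.
  if style == "html" then
    let parts := ["<h1>" ++ title ++ "</h1><p>" ++ intro ++ "</p>"]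
    let parts := if !clusters.isEmpty then
        (clusters.foldl (fun ps li =>
            ps ++ ["<li><b>" ++ pyTitle li.1 ++ "</b>: " ++
                   PySem.Str.join ", " (li.2.map (fun i => PySem.Int.toStr i)) ++ "</li>"])
          (parts ++ ["<h2>Trends</h2><ul>"])) ++ ["</ul>"]
      else parts
    let parts := if !highlights.isEmpty then
        (highlights.foldl (fun ps h => ps ++ ["<li>" ++ h ++ "</li>"])
          (parts ++ ["<h2>Highlights</h2><ul>"])) ++ ["</ul>"]
      else parts
    let parts := parts ++ ["<h2>Articles</h2>"]
    let parts := summaries.foldl (fun ps s =>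
        ps ++ ["<h3>" ++ getS s "title" "" ++ "</h3><p>" ++ getS s "summary_text" "" ++
               "</p><p><i>" ++ getS s "bias_note" "" ++ "</i></p>"]) parts
    PySem.Str.join "\n" parts
  else if style == "text" then
    let parts := [title ++ "\n" ++ underline title ++ "\n" ++ intro ++ "\n"]
    let parts := if !clusters.isEmpty then
        (clusters.foldl (fun ps li =>
            ps ++ ["- " ++ pyTitle li.1 ++ ": " ++
                   PySem.Str.join ", " (li.2.map (fun i => PySem.Int.toStr i))])
          (parts ++ ["Trends:"])) ++ [""]
      else parts
    let parts := if !highlights.isEmpty then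
        (highlights.foldl (fun ps h => ps ++ ["- " ++ h]) (parts ++ ["Highlights:"])) ++ [""]
      else parts
    let parts := parts ++ ["Articles:"]
    let parts := summaries.foldl (fun ps s =>
        ps ++ ["- " ++ getS s "title" "" ++ "\n  " ++ getS s "summary_text" "" ++
               "\n  (" ++ getS s "bias_note" "" ++ ")"]) parts
    PySem.Str.join "\n" parts
  else
    let parts := ["# " ++ title ++ "\n\n" ++ intro ++ "\n"]
    let parts := if !clusters.isEmpty then
        (clusters.foldl (fun ps li =>
            ps ++ ["- **" ++ pyTitle li.1 ++ "**: " ++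
                   PySem.Str.join ", " (li.2.map (fun i => PySem.Int.toStr i))])
          (parts ++ ["## Trends\n"])) ++ [""]
      else parts
    let parts := if !highlights.isEmpty then
        (highlights.foldl (fun ps h => ps ++ ["- " ++ h]) (parts ++ ["## Highlights\n"])) ++ [""]
      else parts
    let parts := parts ++ ["## Articles\n"]
    let parts := summaries.foldl (fun ps s =>
        ps ++ ["### " ++ getS s "title" "" ++ "\n" ++ getS s "summary_text" "" ++
               "\n\n*" ++ getS s "bias_note" "" ++ "*\n"]) parts
    PySem.Str.join "\n" parts

-- ===== PORT B =====
-- the per-style markup table of Source B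
structure DigestCfg where
  header : String
  tOpen : List String
  tClose : List String
  tFmt : String → String → String
  hOpen : List String
  hClose : List String
  hFmt : String → String
  aHead : String
  aFmt : String → String → String → String

def htmlCfg (title intro : String) : DigestCfg :=
  ⟨"<h1>" ++ title ++ "</h1><p>" ++ intro ++ "</p>",
   ["<h2>Trends</h2><ul>"], ["</ul>"],
   fun l t => "<li><b>" ++ l ++ "</b>: " ++ t ++ "</li>",
   ["<h2>Highlights</h2><ul>"], ["</ul>"],
   fun h => "<li>" ++ h ++ "</li>",
   "<h2>Articles</h2>",
   fun t st bn => "<h3>" ++ t ++ "</h3><p>" ++ st ++ "</p><p><i>" ++ bn ++ "</i></p>"⟩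

def textCfg (title intro : String) : DigestCfg :=
  ⟨title ++ "\n" ++ underline title ++ "\n" ++ intro ++ "\n",
   ["Trends:"], [""],
   fun l t => "- " ++ l ++ ": " ++ t,
   ["Highlights:"], [""],
   fun h => "- " ++ h,
   "Articles:",
   fun t st bn => "- " ++ t ++ "\n  " ++ st ++ "\n  (" ++ bn ++ ")"⟩

def mdCfg (title intro : String) : DigestCfg :=
  ⟨"# " ++ title ++ "\n\n" ++ intro ++ "\n",
   ["## Trends\n"], [""],
   fun l t => "- **" ++ l ++ "**: " ++ t,
   ["## Highlights\n"], [""],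
   fun h => "- " ++ h,
   "## Articles\n",
   fun t st bn => "### " ++ t ++ "\n" ++ st ++ "\n\n*" ++ bn ++ "*\n"⟩

def tool_format_digest_alt (summaries : List (List (String × String))) (highlights : List String) (clusters : List (String × List Int)) (prefs : Option (List (String × String))) (style : String) (tone : String) : String :=
  let p := prefs.getD []
  let title := getS p "title" "Daily Digest"
  let intro := if tone == "formal" then "Below is the curated digest." else "Here’s your curated digest."
  let cfg := if style == "html" then htmlCfg title intro
             else if style == "text" then textCfg title intro
             else mdCfg title intro
  -- cluster ids are ints while article ids are strings: A's id_to_title.get(i, str(i))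
  -- never matches, so B formats str(i) directly
  let parts := [cfg.header]
    ++ (if clusters.isEmpty then [] else
          cfg.tOpen ++
          clusters.map (fun li =>
            cfg.tFmt (pyTitle li.1) (PySem.Str.join ", " (li.2.map (fun i => PySem.Int.toStr i)))) ++
          cfg.tClose)
    ++ (if highlights.isEmpty then [] else
          cfg.hOpen ++ highlights.map cfg.hFmt ++ cfg.hClose)
    ++ [cfg.aHead]
    ++ summaries.map (fun s =>
         cfg.aFmt (getS s "title" "") (getS s "summary_text" "") (getS s "bias_note" ""))
  PySem.Str.join "\n" parts

-- ===== PRECONDITION & SPEC =====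
def hasKey (d : List (String × String)) (k : String) : Bool := d.any (fun kv => kv.1 == k)

-- Pre_ excludes exactly the inputs on which Python A raises KeyError: a summary dict missing
-- one of the keys "article_id", "title", "summary_text", "bias_note".
def Pre_tool_format_digest (summaries : List (List (String × String))) (highlights : List String) (clusters : List (String × List Int)) (prefs : Option (List (String × String))) (style : String) (tone : String) : Prop :=
  (summaries.all (fun s =>
    hasKey s "article_id" && hasKey s "title" && hasKey s "summary_text" && hasKey s "bias_note")) = true
instance (summaries : List (List (String × String))) (highlights : List String) (clusters : List (String × List Int)) (prefs : Option (List (String × String))) (style : String) (tone : String) : Decidable (Pre_tool_format_digest summaries highlights clusters prefs style tone) := by unfold Pre_tool_format_digest; infer_instance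

def pvWitness_tool_format_digest : (List (List (String × String))) × List String × (List (String × List Int)) × (Option (List (String × String))) × String × String :=
  ([[("article_id", "a1"), ("title", "Alpha"), ("summary_text", "Sum."), ("bias_note", "low")]],
   ["hi"], [("ai news", [1, 2])], none, "text", "formal")

def Spec_tool_format_digest (summaries : List (List (String × String))) (highlights : List String) (clusters : List (String × List Int)) (prefs : Option (List (String × String))) (style : String) (tone : String) (out : String) : Prop := out = tool_format_digest_alt summaries highlights clusters prefs style tone
instance (summaries : List (List (String × String))) (highlights : List String) (clusters : List (String × List Int)) (prefs : Option (List (String × String))) (style : String) (tone : String) (out : String) : Decidable (Spec_tool_format_digest summaries highlights clusters prefs style tone out) := by unfold Spec_tool_format_digest; infer_instance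

-- ===== CLAIM (what is proved, stated in full; the proofs are below) =====
def Claim_equal_tool_format_digest : Prop := ∀ (summaries : List (List (String × String))) (highlights : List String) (clusters : List (String × List Int)) (prefs : Option (List (String × String))) (style : String) (tone : String), Dom_tool_format_digest summaries highlights clusters prefs style tone → Pre_tool_format_digest summaries highlights clusters prefs style tone → Spec_tool_format_digest summaries highlights clusters prefs style tone (tool_format_digest summaries highlights clusters prefs style tone)

-- ===== LEMMAS AND PROOFS =====
theorem flatten_singleton_map {α β : Type} (f : α → β) (l : List α) :
    (l.map (fun x => [f x])).flatten = l.map f := by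
  induction l <;> simp [*]

-- ===== VERDICT (by name: the statement is the Claim_ definition above) =====
theorem tool_format_digest_spec : Claim_equal_tool_format_digest := by
  intro summaries highlights clusters prefs style tone _ _
  unfold Spec_tool_format_digest tool_format_digest tool_format_digest_alt
  by_cases hs : style == "html" <;> by_cases ht : style == "text" <;>
    simp only [hs, ht, Bool.false_eq_true, reduceIte] <;>
  cases hc : clusters.isEmpty <;> cases hh : highlights.isEmpty <;>
    simp [flatten_singleton_map, htmlCfg, textCfg, mdCfg, List.append_assoc]
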